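-- pv_equiv track=rewrite | github.com/Park-Young-Hun/Algorithm | Python/Programmers/PCCP1_외톨알파벳.py | solution
-- ===== SOURCE A (Python) =====
-- from collections import defaultdict, deque
--
-- def solution(input_string):
--     answer = set()
--
--     chr_cnts = defaultdict(int)
--     appear_dict = defaultdict(bool)
--     window = deque()
--
--     for i in range(len(input_string)):
--         chr_cnts[input_string[i]] += 1
--
--         if window:
--             if window[-1] == input_string[i]:
--                 window.append(input_string[i])
--             if window[-1] != input_string[i] or i == len(input_string) - 1:
--                 target = window[-1]
--
--                 if appear_dict[target] and chr_cnts[target] >= 2: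
--                     answer.add(target)
--
--                 appear_dict[target] = True
--                 window.clear()
--                 window.append(input_string[i])
--
--                 if i == len(input_string) - 1 and target != input_string[i]:
--                     if appear_dict[input_string[i]] and chr_cnts[input_string[i]] >= 2:
--                         answer.add(input_string[i])
--         else:
--             window.append(input_string[i])
--
--     answer = list(answer)
--
--     if answer:
--         answer.sort()
--         answer = "".join(answer)
--     else:
--         answer = "N"
--
--     return answer
-- ===== SOURCE B (Python) =====
-- from collections import Counter
--
-- def solution(input_string):
--     # collapse the string into the sequence of run keys, then count runs per char
--     run_keys = []
--     for c in input_string: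
--         if not run_keys or run_keys[-1] != c:
--             run_keys.append(c)
--     lonely = sorted(c for c, n in Counter(run_keys).items() if n >= 2)
--     return "".join(lonely) if lonely else "N"
-- ===== Notes on version B (the rewrite author's own statement) =====
-- stated objective: simpler
-- what changed: Replaces A's single-pass deque/window/appear_dict/count boundary bookkeeping with two plain phases: collapse the string into its sequence of run keys, then count runs per character with Counter and keep those with at least two runs; the per-character dict updates of A disappear, which also makes B measurably faster by a constant factor.
import Mathlib
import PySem

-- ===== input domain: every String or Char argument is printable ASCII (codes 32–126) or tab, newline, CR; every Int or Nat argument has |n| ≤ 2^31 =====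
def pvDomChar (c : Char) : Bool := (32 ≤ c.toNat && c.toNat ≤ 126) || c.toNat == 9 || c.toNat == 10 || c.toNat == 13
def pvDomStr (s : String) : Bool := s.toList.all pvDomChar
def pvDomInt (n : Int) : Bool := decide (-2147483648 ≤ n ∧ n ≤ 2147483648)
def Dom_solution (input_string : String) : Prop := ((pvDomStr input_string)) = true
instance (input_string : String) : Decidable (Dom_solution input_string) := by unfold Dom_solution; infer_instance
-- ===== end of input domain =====

-- B rewrites A's single-pass deque/window/appear_dict/count bookkeeping as two plain phases
-- (collapse to run keys, then count runs per character); simpler, and measured faster by a constant factor.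

-- ===== PORT A =====
-- state = (answer, chr_cnts, appear_dict, window); one iteration of A's for-loop,
-- `islast` transliterates Python's `i == len(input_string) - 1`.
def solutionStep (st : List Char × PySem.Dict Char Int × PySem.Dict Char Bool × List Char)
    (c : Char) (islast : Bool) :
    List Char × PySem.Dict Char Int × PySem.Dict Char Bool × List Char :=
  match st with
  | (ans, cnts0, appear0, window0) =>
    let cnts := cnts0.insert c (cnts0.getD c 0 + 1)
    if window0.isEmpty then
      (ans, cnts, appear0, window0 ++ [c])
    else
      let window1 := if PySem.List.pyGetD window0 (-1) c == c then window0 ++ [c] else window0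
      if PySem.List.pyGetD window1 (-1) c != c || islast then
        let target := PySem.List.pyGetD window1 (-1) c
        let ans1 := if appear0.getD target false && decide (2 ≤ cnts.getD target 0) then PySem.Set.add ans target else ans
        let appear1 := appear0.insert target true
        let ans2 :=
          if islast && target != c then
            (if appear1.getD c false && decide (2 ≤ cnts.getD c 0) then PySem.Set.add ans1 c else ans1)
          else ans1
        (ans2, cnts, appear1, [c])
      else (ans, cnts, appear0, window1)

def solutionLoop (st : List Char × PySem.Dict Char Int × PySem.Dict Char Bool × List Char) :
    List Char → List Char × PySem.Dict Char Int × PySem.Dict Char Bool × List Char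
  | [] => st
  | c :: rest => solutionLoop (solutionStep st c rest.isEmpty) rest

def solution (input_string : String) : String :=
  let final := solutionLoop ((PySem.Set.empty : PySem.Set Char), (PySem.Dict.empty : PySem.Dict Char Int),
      (PySem.Dict.empty : PySem.Dict Char Bool), ([] : List Char)) input_string.toList
  if final.1.isEmpty then "N" else String.mk (PySem.List.sorted final.1 (fun x => x) false)

-- ===== PORT B =====
-- `if not run_keys or run_keys[-1] != c: run_keys.append(c)`
def runStep (acc : List Char) (c : Char) : List Char :=
  if acc.isEmpty || PySem.List.pyGetD acc (-1) c != c then acc ++ [c] else acc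

def runKeys (l : List Char) : List Char := l.foldl runStep []

def solution_alt (input_string : String) : String :=
  let run_keys := runKeys input_string.toList
  let lonely := PySem.List.sorted
      (((PySem.Dict.counter run_keys).items.filter (fun p => decide (2 ≤ p.2))).map (fun p => p.1))
      (fun x => x) false
  if lonely.isEmpty then "N" else String.mk lonely

-- ===== PRECONDITION & SPEC =====
def Spec_solution (input_string : String) (out : String) : Prop := out = solution_alt input_string
instance (input_string : String) (out : String) : Decidable (Spec_solution input_string out) := by unfold Spec_solution; infer_instance

-- ===== CLAIM (what is proved, stated in full; the proofs are below) =====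
def Claim_equal_solution : Prop := ∀ (input_string : String), Dom_solution input_string → Spec_solution input_string (solution input_string)

-- ===== LEMMAS AND PROOFS =====

theorem runStep_snoc (ks : List Char) (w c : Char) :
    runStep (ks ++ [w]) c = if w = c then ks ++ [w] else ks ++ [w] ++ [c] := by
  by_cases h : w = c <;> simp [runStep, h, PySem.List.pyGetD_neg_one_append_singleton, bne]
theorem runKeys_snoc (p : List Char) (c : Char) : runKeys (p ++ [c]) = runStep (runKeys p) c := by
  simp [runKeys]
theorem count_runKeys_le (l : List Char) (c : Char) : (runKeys l).count c ≤ l.count c := by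
  induction l using List.reverseRecOn with
  | nil => simp [runKeys]
  | append_singleton p x ih =>
    rw [runKeys_snoc]
    rcases (runKeys p).eq_nil_or_concat with q | ⟨ks, w, q⟩
    · simp [q, runStep, List.count_append]
    · rw [List.concat_eq_append] at q
      rw [q, runStep_snoc]; rw [q] at ih
      split <;> (simp_all [List.count_append, List.count_cons]; split_ifs at * <;> simp_all <;> omega)
theorem flush_mem (ans ks : List Char) (w : Char) (hans : ∀ x, x ∈ ans ↔ 2 ≤ ks.count x) (b : Bool)
    (hb : b = decide (w ∈ ks)) :
    ∀ x, x ∈ (if b then PySem.Set.add ans w else ans) ↔ 2 ≤ (ks ++ [w]).count x := by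
  intro x
  subst hb
  by_cases hw : w ∈ ks
  · have h1 : 1 ≤ ks.count w := List.count_pos_iff.mpr hw
    by_cases hx : x = w
    · subst hx
      simp [hw, PySem.Set.mem_add, hans, List.count_append]
    · have hx' : ¬ w = x := fun h => hx h.symm
      simp [hw, PySem.Set.mem_add, hx, hans, List.count_append, hx']
  · have h0 : ks.count w = 0 := List.count_eq_zero.mpr hw
    by_cases hx : x = w
    · subst hx
      simp [hw, hans, List.count_append, h0]
    · have hx' : ¬ w = x := fun h => hx h.symm
      simp [hw, hans, List.count_append, hx']

theorem loop_inv (rest : List Char) : ∀ (p ks : List Char) (w : Char) (ans : List Char)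
    (cnts : PySem.Dict Char Int) (appear : PySem.Dict Char Bool) (window : List Char),
    rest ≠ [] →
    runKeys p = ks ++ [w] →
    window.isEmpty = false →
    (∀ d : Char, PySem.List.pyGetD window (-1) d = w) →
    (∀ x, cnts.getD x 0 = (p.count x : Int)) →
    (∀ x, appear.getD x false = decide (x ∈ ks)) →
    ans.Nodup →
    (∀ x, x ∈ ans ↔ 2 ≤ ks.count x) →
    (solutionLoop (ans, cnts, appear, window) rest).1.Nodup ∧
      ∀ x, (x ∈ (solutionLoop (ans, cnts, appear, window) rest).1 ↔ 2 ≤ (runKeys (p ++ rest)).count x) := by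
  induction rest with
  | nil => intro _ _ _ _ _ _ _ h; exact absurd rfl h
  | cons c rest' ih =>
    intro p ks w ans cnts appear window _ hrk hwe hwin hcnt happ hnd hans
    have hple : ∀ x, List.count x (ks ++ [w]) ≤ List.count x p := by
      intro x; have h := count_runKeys_le p x; rwa [hrk] at h
    have hcnt' : ∀ x, (cnts.insert c (cnts.getD c 0 + 1)).getD x 0 = ((p ++ [c]).count x : Int) := by
      intro x
      rw [PySem.Dict.getD_insert]
      by_cases hx : x = c
      · subst hx; rw [if_pos rfl, hcnt]; simp [List.count_append]
      · rw [if_neg hx, hcnt]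
        have h0 : List.count x [c] = 0 := List.count_eq_zero.mpr (by simp [hx])
        simp [List.count_append, h0]
    by_cases hwc : w = c
    · subst hwc
      rcases rest' with _ | ⟨r, rs⟩
      · -- last char, it extends the current run of w; that run is flushed
        have hb : (appear.getD w false && decide (2 ≤ (cnts.insert w (cnts.getD w 0 + 1)).getD w 0))
            = decide (w ∈ ks) := by
          rw [happ, hcnt']
          by_cases hc : w ∈ ks
          · have h2 : 1 ≤ List.count w (ks ++ [w]) := by simp [List.count_append]
            have h3 := hple w
            have h4 : (2:Int) ≤ ((p ++ [w]).count w : Int) := by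
              have h1 : 1 ≤ ks.count w := List.count_pos_iff.mpr hc
              have hw1 : List.count w [w] = 1 := by simp
              simp only [List.count_append, hw1] at h3 ⊢
              push_cast
              omega
            simp only [hc, decide_true, Bool.true_and, decide_eq_true_eq]
            exact h4
          · simp [hc]
        simp only [solutionLoop, solutionStep, hwe, hwin, List.isEmpty_nil, beq_self_eq_true,
          if_true, PySem.List.pyGetD_neg_one_append_singleton, bne_self_eq_false, Bool.false_or,
          Bool.and_false, if_false, Bool.false_eq_true]
        rw [runKeys_snoc, hrk, runStep_snoc, if_pos rfl]
        constructor
        · split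
          · exact PySem.Set.nodup_add _ _ hnd
          · exact hnd
        · exact flush_mem ans ks w hans _ hb
      · -- not last: the run of w grows, nothing flushed
        have hstep : solutionStep (ans, cnts, appear, window) w false
            = (ans, cnts.insert w (cnts.getD w 0 + 1), appear, window ++ [w]) := by
          simp only [solutionStep, hwe, hwin, beq_self_eq_true, if_true,
            PySem.List.pyGetD_neg_one_append_singleton, bne_self_eq_false, Bool.false_or,
            Bool.false_eq_true, if_false]
        rw [show solutionLoop (ans, cnts, appear, window) (w :: r :: rs)
            = solutionLoop (solutionStep (ans, cnts, appear, window) w false) (r :: rs) from rfl,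
          hstep, show p ++ w :: r :: rs = (p ++ [w]) ++ r :: rs by simp]
        exact ih (p ++ [w]) ks w ans _ appear (window ++ [w]) (by simp)
          (by rw [runKeys_snoc, hrk, runStep_snoc, if_pos rfl]) (by simp)
          (fun d => PySem.List.pyGetD_neg_one_append_singleton window w d) hcnt' happ hnd hans
    · -- w ≠ c : the run of w is flushed, c starts a new run
      have hbeq : (w == c) = false := by simp [hwc]
      have hbne : (w != c) = true := by simp [bne, hwc]
      have hwc' : ¬ c = w := fun h => hwc h.symm
      have hb1 : (appear.getD w false && decide (2 ≤ (cnts.insert c (cnts.getD c 0 + 1)).getD w 0))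
          = decide (w ∈ ks) := by
        rw [happ, hcnt']
        by_cases hc : w ∈ ks
        · have h1 : 1 ≤ ks.count w := List.count_pos_iff.mpr hc
          have h3 := hple w
          have h4 : (2:Int) ≤ ((p ++ [c]).count w : Int) := by
            have hw1 : List.count w [w] = 1 := by simp
            have hc0 : List.count w [c] = 0 := List.count_eq_zero.mpr (by simp [hwc])
            simp only [List.count_append, hw1, hc0] at h3 ⊢
            push_cast
            omega
          simp only [hc, decide_true, Bool.true_and, decide_eq_true_eq]
          exact h4
        · simp [hc]
      have hans1 := flush_mem ans ks w hans _ hb1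
      have hnd1 : (if (appear.getD w false && decide (2 ≤ (cnts.insert c (cnts.getD c 0 + 1)).getD w 0))
          then PySem.Set.add ans w else ans).Nodup := by
        split
        · exact PySem.Set.nodup_add _ _ hnd
        · exact hnd
      have happ1 : ∀ x, ((appear.insert w true).getD x false) = decide (x ∈ ks ++ [w]) := by
        intro x
        rw [PySem.Dict.getD_insert]
        by_cases hx : x = w <;> simp [hx, happ, List.mem_append]
      rcases rest' with _ | ⟨r, rs⟩
      · -- last char: after flushing w's run, the lone last char c is a completed run too
        have hb2 : ((appear.insert w true).getD c false && decide (2 ≤ (cnts.insert c (cnts.getD c 0 + 1)).getD c 0))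
            = decide (c ∈ ks ++ [w]) := by
          rw [happ1, hcnt']
          by_cases hc : c ∈ ks ++ [w]
          · have hcks : c ∈ ks := by
              rcases List.mem_append.mp hc with h | h
              · exact h
              · simp at h; exact absurd h hwc'
            have h1 : 1 ≤ ks.count c := List.count_pos_iff.mpr hcks
            have h3 := hple c
            have h4 : (2:Int) ≤ ((p ++ [c]).count c : Int) := by
              have hw0 : List.count c [w] = 0 := List.count_eq_zero.mpr (by simp [hwc'])
              have hc1 : List.count c [c] = 1 := by simp
              simp only [List.count_append, hw0] at h3
              simp only [List.count_append, hc1]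
              push_cast
              omega
            simp only [hc, decide_true, Bool.true_and, decide_eq_true_eq]
            exact h4
          · simp [hc]
        simp only [solutionLoop, solutionStep, hwe, hwin, List.isEmpty_nil, hbeq, hbne,
          Bool.false_eq_true, if_false, Bool.or_true, if_true, Bool.true_and]
        rw [runKeys_snoc, hrk, runStep_snoc, if_neg hwc]
        constructor
        · split
          · exact PySem.Set.nodup_add _ _ hnd1
          · exact hnd1
        · exact flush_mem _ (ks ++ [w]) c hans1 _ hb2
      · -- not last: flush run of w, window restarts at c
        have hstep : solutionStep (ans, cnts, appear, window) c false
            = (if (appear.getD w false && decide (2 ≤ (cnts.insert c (cnts.getD c 0 + 1)).getD w 0))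
                then PySem.Set.add ans w else ans,
               cnts.insert c (cnts.getD c 0 + 1), appear.insert w true, [c]) := by
          simp only [solutionStep, hwe, hwin, hbeq, Bool.false_eq_true, if_false, hbne,
            Bool.true_or, if_true, Bool.false_and]
        rw [show solutionLoop (ans, cnts, appear, window) (c :: r :: rs)
            = solutionLoop (solutionStep (ans, cnts, appear, window) c false) (r :: rs) from rfl,
          hstep, show p ++ c :: r :: rs = (p ++ [c]) ++ r :: rs by simp]
        exact ih (p ++ [c]) (ks ++ [w]) c _ _ (appear.insert w true) [c] (by simp)
          (by rw [runKeys_snoc, hrk, runStep_snoc, if_neg hwc]) (by simp)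
          (fun d => by simpa using PySem.List.pyGetD_neg_one_append_singleton [] c d)
          hcnt' happ1 hnd1 hans1

theorem alt_lonely (rk : List Char) :
    ((PySem.Dict.counter rk).items.filter (fun p => decide (2 ≤ p.2))).map (fun p => p.1)
      = (PySem.Set.ofList rk).filter (fun k => decide (2 ≤ (rk.count k : Int))) := by
  rw [PySem.Dict.items_counter, List.filter_map, List.map_map]
  have h1 : ((fun (p : Char × Int) => p.1) ∘ fun k => (k, (rk.count k : Int))) = id := rfl
  rw [h1, List.map_id]
  exact List.filter_congr (fun k _ => by simp)

theorem ports_eq (s : String) : solution s = solution_alt s := by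
  simp only [solution, solution_alt]
  rcases q : s.toList with _ | ⟨c, rest⟩
  · rfl
  · rcases rest with _ | ⟨r, rs⟩
    · -- single-character string: no completed double run on either side
      have hA : (solutionLoop (PySem.Set.empty, PySem.Dict.empty, PySem.Dict.empty, []) [c]).1 = ([] : List Char) := rfl
      have hB : runKeys [c] = [c] := by simp [runKeys, runStep]
      rw [hA, hB, alt_lonely]
      have hF : (PySem.Set.ofList [c]).filter (fun k => decide (2 ≤ (([c] : List Char).count k : Int))) = [] := by
        simp [PySem.Set.ofList_cons, PySem.Set.ofList_nil, PySem.Set.discard, List.count_cons]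
      rw [hF]
      rfl
    · -- at least two characters: apply the loop invariant after the first iteration
      have hstep1 : solutionLoop (PySem.Set.empty, PySem.Dict.empty, PySem.Dict.empty, []) (c :: r :: rs)
          = solutionLoop (PySem.Set.empty, PySem.Dict.empty.insert c (PySem.Dict.empty.getD c 0 + 1),
              PySem.Dict.empty, [c]) (r :: rs) := by
        rfl
      have hrk1 : runKeys [c] = [] ++ [c] := by simp [runKeys, runStep]
      have hwin1 : ∀ d : Char, PySem.List.pyGetD [c] (-1) d = c := fun d => by
        simpa using PySem.List.pyGetD_neg_one_append_singleton [] c d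
      have hcnt1 : ∀ x, (PySem.Dict.empty.insert c (PySem.Dict.empty.getD c 0 + 1)).getD x 0
          = ((([c] : List Char).count x : Int)) := by
        intro x
        rw [PySem.Dict.getD_insert]
        by_cases hx : x = c
        · subst hx; simp [PySem.Dict.getD_empty]
        · have hx' : ¬ c = x := fun h => hx h.symm
          simp [hx, hx', PySem.Dict.getD_empty]
      have happ1 : ∀ x : Char, PySem.Dict.empty.getD x false = decide (x ∈ ([] : List Char)) := by
        simp [PySem.Dict.getD_empty]
      obtain ⟨hndA, hmemA⟩ := loop_inv (r :: rs) [c] [] c PySem.Set.empty _ PySem.Dict.empty [c]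
        (by simp) hrk1 (by simp) hwin1 hcnt1 happ1 (by simp) (by simp)
      rw [hstep1]
      rw [alt_lonely]
      set rk := runKeys (c :: r :: rs) with hrkdef
      set ansA := (solutionLoop (PySem.Set.empty, PySem.Dict.empty.insert c (PySem.Dict.empty.getD c 0 + 1),
        PySem.Dict.empty, [c]) (r :: rs)).1 with hansdef
      have hmemA' : ∀ x, x ∈ ansA ↔ 2 ≤ rk.count x := by
        intro x
        have h := hmemA x
        simpa using h
      set L := (PySem.Set.ofList rk).filter (fun k => decide (2 ≤ (rk.count k : Int))) with hLdef
      have hndB : L.Nodup := (PySem.Set.nodup_ofList rk).filter _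
      have hmemB : ∀ x, x ∈ L ↔ 2 ≤ rk.count x := by
        intro x
        rw [hLdef, List.mem_filter, PySem.Set.mem_ofList]
        constructor
        · rintro ⟨-, h⟩
          simp at h
          exact_mod_cast h
        · intro h
          refine ⟨List.count_pos_iff.mp (by omega), by simp; exact_mod_cast h⟩
      have hperm : ansA.Perm L := (List.perm_ext_iff_of_nodup hndA hndB).mpr
        (fun a => (hmemA' a).trans (hmemB a).symm)
      have hsort : PySem.List.sorted ansA (fun x => x) false = PySem.List.sorted L (fun x => x) false :=
        PySem.List.sorted_eq_sorted_of_perm _ _ _ (fun a b h => h) hperm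
      by_cases he : ansA = []
      · have hL : L = [] := List.perm_nil.mp (he ▸ hperm).symm
        rw [he, hL]
        rfl
      · have hLne : L ≠ [] := fun h => he (List.perm_nil.mp (h ▸ hperm))
        have h1 : ansA.isEmpty = false := by simp [he]
        have h2 : (PySem.List.sorted L (fun x => x) false).isEmpty = false := by
          simp [PySem.List.sorted_eq_nil_iff, hLne]
        rw [h1, h2, hsort]

-- ===== VERDICT (by name: the statement is the Claim_ definition above) =====
theorem solution_spec : Claim_equal_solution := by
  intro s _
  unfold Spec_solution
  exact ports_eq s
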